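-- pv_equiv track=rewrite | github.com/kjetilfr/BlackJack | BlackJackStrategy/hardHand.py | getHardTotal
-- ===== SOURCE A (Python) =====
-- def getHardTotal(playerHand):
--     hardTotal = 0
--     for card in playerHand:
--         if card == 11:
--             hardTotal += 1
--         else:
--             hardTotal += card
--     return hardTotal
-- ===== SOURCE B (Python) =====
-- def getHardTotal(playerHand):
--     # Divide and conquer: hard total of a hand is the hard total of its left
--     # half plus that of its right half; a single ace (11) counts as 1.
--     n = len(playerHand)
--     if n == 0:
--         return 0
--     if n == 1:
--         c = playerHand[0]
--         return 1 if c == 11 else c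
--     mid = n // 2
--     return getHardTotal(playerHand[:mid]) + getHardTotal(playerHand[mid:])
-- ===== Notes on version B (the rewrite author's own statement) =====
-- stated objective: alternative
-- what changed: Replaces A's left-to-right accumulator loop by a divide-and-conquer recursion: split the hand in half, recursively total each half and add, with singleton aces (11) scored as 1.
import Mathlib
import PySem

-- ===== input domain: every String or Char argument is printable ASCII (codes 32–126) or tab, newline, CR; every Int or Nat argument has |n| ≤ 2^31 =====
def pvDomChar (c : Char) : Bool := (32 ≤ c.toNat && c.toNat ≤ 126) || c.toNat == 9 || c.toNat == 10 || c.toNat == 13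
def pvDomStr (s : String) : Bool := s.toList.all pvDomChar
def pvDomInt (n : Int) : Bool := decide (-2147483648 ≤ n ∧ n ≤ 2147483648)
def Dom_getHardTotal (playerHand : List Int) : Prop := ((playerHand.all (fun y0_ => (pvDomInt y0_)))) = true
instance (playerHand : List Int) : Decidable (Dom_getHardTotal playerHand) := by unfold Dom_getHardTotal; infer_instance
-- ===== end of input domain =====

-- B replaces A's left-to-right accumulator loop by a divide-and-conquer recursion: split the hand in half, total each half recursively and add (singleton ace = 1).

-- ===== PORT A =====
def getHardTotal (playerHand : List Int) : Int :=
  playerHand.foldl (fun hardTotal card => if card == 11 then hardTotal + 1 else hardTotal + card) 0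

-- ===== PORT B =====
def getHardTotal_alt (playerHand : List Int) : Int :=
  match playerHand with
  | [] => 0
  | [c] => if c == 11 then 1 else c
  | xs@(_ :: _ :: _) =>
      let mid := (xs.length : Int) / 2
      getHardTotal_alt (PySem.List.slice xs none (some mid)) +
        getHardTotal_alt (PySem.List.slice xs (some mid) none)
termination_by playerHand.length
decreasing_by
  · rw [PySem.List.slice_to xs (Int.ediv_nonneg (Int.natCast_nonneg _) (by norm_num))]
    simp_all [List.length_take]
    omega
  · rw [PySem.List.slice_from xs (Int.ediv_nonneg (Int.natCast_nonneg _) (by norm_num))]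
    simp_all [List.length_drop]
    omega

-- ===== PRECONDITION & SPEC =====
def Spec_getHardTotal (playerHand : List Int) (out : Int) : Prop := out = getHardTotal_alt playerHand
instance (playerHand : List Int) (out : Int) : Decidable (Spec_getHardTotal playerHand out) := by unfold Spec_getHardTotal; infer_instance

-- ===== CLAIM (what is proved, stated in full; the proofs are below) =====
def Claim_equal_getHardTotal : Prop := ∀ (playerHand : List Int), Dom_getHardTotal playerHand → Spec_getHardTotal playerHand (getHardTotal playerHand)

-- ===== LEMMAS AND PROOFS =====
theorem getHardTotal_alt_eq_mapsum (xs : List Int) :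
    getHardTotal_alt xs = (xs.map (fun c => if c == 11 then (1 : Int) else c)).sum := by
  induction xs using getHardTotal_alt.induct with
  | case1 => simp [getHardTotal_alt]
  | case2 c h => simp [getHardTotal_alt, h]; intro hc; simp_all
  | case3 c h => simp [getHardTotal_alt, h]; intro hc; simp_all
  | case4 a b rest mid ih1 ih2 =>
    rw [getHardTotal_alt]
    rw [ih1, ih2, ← List.sum_append, ← List.map_append]
    rw [PySem.List.slice_to _ (Int.ediv_nonneg (Int.natCast_nonneg _) (by norm_num)),
        PySem.List.slice_from _ (Int.ediv_nonneg (Int.natCast_nonneg _) (by norm_num)),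
        List.take_append_drop]

theorem getHardTotal_foldl_general (xs : List Int) (acc : Int) :
    xs.foldl (fun hardTotal card => if card == 11 then hardTotal + 1 else hardTotal + card) acc
      = acc + (xs.map (fun c => if c == 11 then (1 : Int) else c)).sum := by
  induction xs generalizing acc with
  | nil => simp
  | cons x xs ih =>
    simp only [List.foldl, List.map, List.sum_cons]
    rw [ih]
    by_cases h : x = 11
    · subst h; simp; ring
    · have hb : (x == 11) = false := by simpa using h
      rw [hb]
      simp only [Bool.false_eq_true, if_false]
      ring

-- ===== VERDICT (by name: the statement is the Claim_ definition above) =====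
theorem getHardTotal_spec : Claim_equal_getHardTotal := by
  intro xs _
  unfold Spec_getHardTotal getHardTotal
  rw [getHardTotal_foldl_general, getHardTotal_alt_eq_mapsum]; ring
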